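-- pv_equiv track=rewrite | github.com/BuffaloWebDev/CSE312project | webserver/parse.py | requestHeaders
-- ===== SOURCE A (Python) =====
-- def requestHeaders(headers):
--     requestHeaders = {}
--     for header in headers:
--         header = header.split(":")
--         if len(header) == 2:
--             header[1] = header[1].split(";")
--             value = [x.split(",") for x in header[1]]
--             temp = []
--             for y in value:
--                 for z in y:
--                     temp.append(z.strip())
--             requestHeaders[header[0]] = temp
--     return requestHeaders
-- ===== SOURCE B (Python) =====
-- def requestHeaders(headers):
--     result = {}
--     for header in headers:
--         key = None
--         values = []
--         tok = []
--         bad = False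
--         for ch in header:
--             if key is None:
--                 if ch == ":":
--                     key = "".join(tok)
--                     tok = []
--                 else:
--                     tok.append(ch)
--             elif ch == ":":
--                 bad = True
--                 break
--             elif ch == ";" or ch == ",":
--                 values.append("".join(tok).strip())
--                 tok = []
--             else:
--                 tok.append(ch)
--         if key is not None and not bad:
--             values.append("".join(tok).strip())
--             result[key] = values
--     return result
-- ===== Notes on version B (the rewrite author's own statement) =====
-- stated objective: alternative
-- what changed: B replaces A's staged split(':')/split(';')/split(',') passes and nested flattening loops with a single character-level state-machine scan of each header that tokenizes the key and the delimiter-separated values in one pass.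
import Mathlib
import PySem

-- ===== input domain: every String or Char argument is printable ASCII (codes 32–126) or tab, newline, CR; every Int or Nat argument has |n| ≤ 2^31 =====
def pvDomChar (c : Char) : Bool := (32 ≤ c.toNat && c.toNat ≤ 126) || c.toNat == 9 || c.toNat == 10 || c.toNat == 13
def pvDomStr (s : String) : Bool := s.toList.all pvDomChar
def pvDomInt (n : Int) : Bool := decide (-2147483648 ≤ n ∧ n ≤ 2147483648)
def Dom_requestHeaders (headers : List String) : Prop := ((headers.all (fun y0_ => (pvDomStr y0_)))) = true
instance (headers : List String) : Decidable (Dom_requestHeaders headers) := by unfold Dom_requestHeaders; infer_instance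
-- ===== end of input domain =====

-- B replaces A's staged split(':')/split(';')/split(',') passes and nested flattening
-- loops by a single character-level state-machine scan of each header (objective: alternative).

-- ===== PORT A =====
-- A-side helper: the body of A's outer loop (header.split(":"), the len==2 guard, the
-- nested split/strip loops building temp, and the dict assignment).
def pvStepA (d : PySem.Dict String (List String)) (header : String) :
    PySem.Dict String (List String) :=
  match (PySem.Chars.splitOn header.toList [':']).map String.ofList with
  | [k, v] =>
      let h1 := (PySem.Chars.splitOn v.toList [';']).map String.ofList
      let value := h1.map (fun x => (PySem.Chars.splitOn x.toList [',']).map String.ofList)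
      let temp := value.foldl (fun temp y => y.foldl (fun temp z => temp ++ [PySem.Str.strip z]) temp) []
      d.insert k temp
  | _ => d

def requestHeaders (headers : List String) : List (String × List String) :=
  (headers.foldl pvStepA PySem.Dict.empty).items

-- ===== PORT B =====
-- B-side helper: B's inner character scan: key is None until the first ':' (tok collects
-- the key), then tokens are cut at ';' or ',' and stripped; a second ':' aborts (bad/break).
def pvScanB : List Char → Option String → List String → List Char → Option (String × List String)
  | [], key, values, tok =>
      match key with
      | some k => some (k, values ++ [PySem.Str.strip (String.ofList tok)])
      | none => none
  | c :: rest, key, values, tok =>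
      match key with
      | none =>
          if c = ':' then pvScanB rest (some (String.ofList tok)) values []
          else pvScanB rest none values (tok ++ [c])
      | some k =>
          if c = ':' then none
          else if c = ';' ∨ c = ',' then
            pvScanB rest (some k) (values ++ [PySem.Str.strip (String.ofList tok)]) []
          else pvScanB rest (some k) values (tok ++ [c])

def requestHeaders_alt (headers : List String) : List (String × List String) :=
  (headers.foldl (fun d header =>
      match pvScanB header.toList none [] [] with
      | some (k, vals) => d.insert k vals
      | none => d) PySem.Dict.empty).items

-- ===== PRECONDITION & SPEC =====
def Spec_requestHeaders (headers : List String) (out : List (String × List String)) : Prop := out = requestHeaders_alt headers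
instance (headers : List String) (out : List (String × List String)) : Decidable (Spec_requestHeaders headers out) := by unfold Spec_requestHeaders; infer_instance

-- ===== CLAIM (what is proved, stated in full; the proofs are below) =====
def Claim_equal_requestHeaders : Prop := ∀ (headers : List String), Dom_requestHeaders headers → Spec_requestHeaders headers (requestHeaders headers)

-- ===== LEMMAS AND PROOFS =====
def splitCh (c : Char) : List Char → List (List Char)
  | [] => [[]]
  | a :: t =>
      if a = c then [] :: splitCh c t
      else match splitCh c t with
        | [] => [[a]]
        | h :: r => (a :: h) :: r

theorem splitCh_ne_nil (c : Char) (l : List Char) : splitCh c l ≠ [] := by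
  cases l with
  | nil => simp [splitCh]
  | cons a t =>
    simp only [splitCh]
    split
    · simp
    · split <;> simp

theorem go_single (c : Char) (l : List Char) : ∀ (fuel : Nat) (cur : List Char) (acc : List (List Char)),
    l.length < fuel →
    PySem.Chars.splitOn.go [c] fuel l cur acc
      = acc.reverse ++ (match splitCh c l with
          | [] => []
          | h :: r => (cur.reverse ++ h) :: r) := by
  induction l with
  | nil =>
    intro fuel cur acc hf
    match fuel, hf with
    | fuel+1, _ =>
      simp [PySem.Chars.splitOn.go, splitCh]
  | cons a t ih =>
    intro fuel cur acc hf
    match fuel, hf with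
    | fuel+1, hf =>
      rw [PySem.Chars.splitOn.go]
      by_cases hac : a = c
      · subst hac
        have hp : List.isPrefixOf [a] (a :: t) = true := by simp [List.isPrefixOf]
        simp only [hp, if_true, List.length_cons, List.length_nil, Nat.zero_add,
          List.drop_succ_cons, List.drop_zero] at *
        rw [ih fuel [] (cur.reverse :: acc) (by omega)]
        rcases hsp : splitCh a t with _ | ⟨h, r⟩
        · exact absurd hsp (splitCh_ne_nil a t)
        · simp [splitCh, hsp]
      · have hp : List.isPrefixOf [c] (a :: t) = false := by
          simp [List.isPrefixOf]
          exact fun h => absurd h.symm hac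
        simp only [hp, if_false, Bool.false_eq_true, List.length_cons] at *
        rw [ih fuel (a :: cur) acc (by omega)]
        rcases hsp : splitCh c t with _ | ⟨h, r⟩
        · exact absurd hsp (splitCh_ne_nil c t)
        · simp [splitCh, hsp, hac]

theorem splitOn_single (c : Char) (l : List Char) :
    PySem.Chars.splitOn l [c] = splitCh c l := by
  rw [PySem.Chars.splitOn, go_single c l (l.length + 1) [] [] (by omega)]
  rcases hsp : splitCh c l with _ | ⟨h, r⟩
  · exact absurd hsp (splitCh_ne_nil c l)
  · simp

theorem replace_go_single (a b : Char) (l : List Char) : ∀ (fuel : Nat) (acc : List Char),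
    l.length ≤ fuel →
    PySem.Chars.replace.go [a] [b] fuel l acc
      = acc.reverse ++ l.map (fun c => if c = a then b else c) := by
  induction l with
  | nil =>
    intro fuel acc hf
    cases fuel <;> simp [PySem.Chars.replace.go]
  | cons x t ih =>
    intro fuel acc hf
    match fuel, hf with
    | fuel+1, hf =>
      rw [PySem.Chars.replace.go]
      by_cases hxa : x = a
      · subst hxa
        have hp : List.isPrefixOf [x] (x :: t) = true := by simp [List.isPrefixOf]
        simp only [hp, if_true, List.length_cons, List.length_nil, Nat.zero_add,
          List.drop_succ_cons, List.drop_zero] at *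
        rw [ih fuel ([b].reverse ++ acc) (by omega)]
        simp
      · have hp : List.isPrefixOf [a] (x :: t) = false := by
          simp [List.isPrefixOf]
          exact fun h => absurd h.symm hxa
        simp only [hp, if_false, Bool.false_eq_true, List.length_cons] at *
        rw [ih fuel (x :: acc) (by omega)]
        simp [hxa]

theorem replace_single (a b : Char) (l : List Char) :
    PySem.Chars.replace l [a] [b] = l.map (fun c => if c = a then b else c) := by
  rw [PySem.Chars.replace]
  simp only [List.isEmpty_cons, if_false, Bool.false_eq_true]
  exact replace_go_single a b l l.length [] (le_refl _)

theorem flat_split (l : List Char) :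
    (splitCh ';' l).flatMap (fun x => splitCh ',' x)
      = splitCh ',' (l.map (fun c => if c = ';' then ',' else c)) := by
  induction l with
  | nil => simp [splitCh]
  | cons a t ih =>
    by_cases h1 : a = ';'
    · subst h1
      simp [splitCh, ih]
    · by_cases h2 : a = ','
      · subst h2
        simp only [splitCh, List.map_cons, if_neg h1]
        rcases hsp : splitCh ';' t with _ | ⟨h, r⟩
        · exact absurd hsp (splitCh_ne_nil ';' t)
        · rw [hsp] at ih
          simp only [List.flatMap_cons] at ih ⊢
          rw [← ih]
          simp [splitCh]
      · simp only [splitCh, List.map_cons, if_neg h1, if_neg h2]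
        rcases hsp : splitCh ';' t with _ | ⟨h, r⟩
        · exact absurd hsp (splitCh_ne_nil ';' t)
        · rw [hsp] at ih
          simp only [List.flatMap_cons] at ih ⊢
          rcases hsp2 : splitCh ',' h with _ | ⟨hh, rr⟩
          · exact absurd hsp2 (splitCh_ne_nil ',' h)
          · rw [hsp2] at ih
            rw [← ih]
            simp [splitCh, if_neg h2, hsp2]

theorem inner_fold (f : String → String) (y : List String) : ∀ (t : List String),
    y.foldl (fun t z => t ++ [f z]) t = t ++ y.map f := by
  induction y with
  | nil => simp
  | cons a tl ih => intro t; simp [List.foldl_cons, ih]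

theorem outer_fold (f : String → String) (L : List (List String)) : ∀ (acc : List String),
    L.foldl (fun t y => y.foldl (fun t z => t ++ [f z]) t) acc = acc ++ (L.flatMap id).map f := by
  induction L with
  | nil => simp
  | cons y tl ih =>
    intro acc
    rw [List.foldl_cons, inner_fold, ih]
    simp [List.flatMap_cons]

theorem flatMap_map_ofList (L : List (List Char)) :
    List.flatMap id (L.map (fun cs => (PySem.Chars.splitOn cs [',']).map String.ofList))
      = (L.flatMap (fun cs => splitCh ',' cs)).map String.ofList := by
  induction L with
  | nil => simp
  | cons a tl ih =>
    rw [List.map_cons, List.flatMap_cons, List.flatMap_cons, ih, List.map_append, splitOn_single]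
    rfl

theorem value_eq (v : String) :
    (((PySem.Chars.splitOn v.toList [';']).map String.ofList).map
        (fun x => (PySem.Chars.splitOn x.toList [',']).map String.ofList)).foldl
      (fun temp y => y.foldl (fun temp z => temp ++ [PySem.Str.strip z]) temp) []
    = ((PySem.Chars.splitOn (PySem.Chars.replace v.toList [';'] [',']) [',']).map String.ofList).map
        PySem.Str.strip := by
  rw [outer_fold, List.nil_append, List.map_map]
  have hcomp : ((fun x => (PySem.Chars.splitOn x.toList [',']).map String.ofList) ∘ String.ofList)
      = fun cs => (PySem.Chars.splitOn cs [',']).map String.ofList := by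
    funext cs; simp [Function.comp]
  rw [hcomp, flatMap_map_ofList, splitOn_single, flat_split,
    replace_single ';' ',' v.toList, splitOn_single]

-- B-side characterisation: splitting on either ';' or ',' in one pass.
def splitU : List Char → List (List Char)
  | [] => [[]]
  | a :: t =>
      if a = ';' ∨ a = ',' then [] :: splitU t
      else match splitU t with
        | [] => [[a]]
        | h :: r => (a :: h) :: r

theorem splitU_ne_nil (l : List Char) : splitU l ≠ [] := by
  cases l with
  | nil => simp [splitU]
  | cons a t =>
    simp only [splitU]
    split
    · simp
    · split <;> simp

theorem splitU_eq (l : List Char) :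
    splitU l = splitCh ',' (l.map (fun c => if c = ';' then ',' else c)) := by
  induction l with
  | nil => simp [splitU, splitCh]
  | cons a t ih =>
    by_cases h1 : a = ';'
    · subst h1; simp [splitU, splitCh, ih]
    · by_cases h2 : a = ','
      · subst h2; simp [splitU, splitCh, ih, h1]
      · simp only [splitU, splitCh, List.map_cons, if_neg h1, if_neg h2]
        rw [ih, if_neg (show ¬(a = ';' ∨ a = ',') from by simp [h1, h2])]

theorem splitCh_length (c : Char) (l : List Char) :
    (splitCh c l).length = l.count c + 1 := by
  induction l with
  | nil => simp [splitCh]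
  | cons a t ih =>
    by_cases h : a = c
    · subst h; simp [splitCh, ih]
    · simp only [splitCh, if_neg h]
      rcases hsp : splitCh c t with _ | ⟨hh, r⟩
      · exact absurd hsp (splitCh_ne_nil c t)
      · rw [hsp] at ih
        simp_all

theorem splitCh_not_mem (c : Char) (l : List Char) (h : c ∉ l) : splitCh c l = [l] := by
  induction l with
  | nil => simp [splitCh]
  | cons a t ih =>
    have ha : a ≠ c := fun he => h (by simp [he])
    have ht : c ∉ t := fun hm => h (by simp [hm])
    simp [splitCh, ha, ih ht]

theorem splitCh_single (c : Char) (l q : List Char) (h : splitCh c l = [q]) :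
    c ∉ l ∧ q = l := by
  have hc : l.count c = 0 := by
    have := splitCh_length c l
    rw [h] at this; simpa using this
  have hnm : c ∉ l := by simpa [List.count_eq_zero] using hc
  have := splitCh_not_mem c l hnm
  rw [h] at this
  exact ⟨hnm, by injection this⟩

theorem mem_of_splitCh_two (c : Char) (l : List Char) {p q : List Char} {r : List (List Char)}
    (h : splitCh c l = p :: q :: r) : c ∈ l := by
  have := splitCh_length c l
  rw [h] at this
  simp only [List.length_cons] at this
  have : 1 ≤ l.count c := by omega
  exact List.count_pos_iff.mp (by omega)

-- phase 2 with a later ':' : the scan aborts (Python's bad/break)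
theorem scan2_colon (q : List Char) (hq : ':' ∈ q) : ∀ (k : String) (values : List String) (tok : List Char),
    pvScanB q (some k) values tok = none := by
  induction q with
  | nil => simp at hq
  | cons c rest ih =>
    intro k values tok
    by_cases hc : c = ':'
    · simp [pvScanB, hc]
    · have hrest : ':' ∈ rest := by
        rcases List.mem_cons.mp hq with h | h
        · exact absurd h.symm hc
        · exact h
      by_cases hd : c = ';' ∨ c = ','
      · simp only [pvScanB, if_neg hc, if_pos hd]
        exact ih hrest k _ []
      · simp only [pvScanB, if_neg hc, if_neg hd]
        exact ih hrest k values _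

-- phase 2 without ':' : the scan returns the stripped tokens cut at ';'/','
theorem scan2_no (q : List Char) (hq : ':' ∉ q) (k : String) : ∀ (values : List String) (tok : List Char),
    pvScanB q (some k) values tok
      = some (k, values ++ ((match splitU q with
          | [] => []
          | h :: r => (tok ++ h) :: r).map (fun cs => PySem.Str.strip (String.ofList cs)))) := by
  induction q with
  | nil => intro values tok; simp [pvScanB, splitU]
  | cons c rest ih =>
    intro values tok
    have hc : c ≠ ':' := fun he => hq (by simp [he])
    have hrest : ':' ∉ rest := fun hm => hq (by simp [hm])
    by_cases hd : c = ';' ∨ c = ','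
    · simp only [pvScanB, if_neg hc, if_pos hd]
      rw [ih hrest (values ++ [PySem.Str.strip (String.ofList tok)]) []]
      rcases hsp : splitU rest with _ | ⟨h, r⟩
      · exact absurd hsp (splitU_ne_nil rest)
      · simp [splitU, hd, hsp]
    · simp only [pvScanB, if_neg hc, if_neg hd]
      rw [ih hrest values (tok ++ [c])]
      rcases hsp : splitU rest with _ | ⟨h, r⟩
      · exact absurd hsp (splitU_ne_nil rest)
      · simp [splitU, hd, hsp]

-- phase 1: the whole scan, characterised by splitCh ':' on the header
theorem scan1 (l : List Char) : ∀ (values : List String) (tok : List Char),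
    pvScanB l none values tok
      = match splitCh ':' l with
        | [p, q] => some (String.ofList (tok ++ p),
            values ++ (splitU q).map (fun cs => PySem.Str.strip (String.ofList cs)))
        | _ => none := by
  induction l with
  | nil => intro values tok; simp [pvScanB, splitCh]
  | cons c rest ih =>
    intro values tok
    by_cases hc : c = ':'
    · subst hc
      simp only [pvScanB]
      rcases hsp : splitCh ':' rest with _ | ⟨p, _ | ⟨q, r⟩⟩
      · exact absurd hsp (splitCh_ne_nil ':' rest)
      · obtain ⟨hnm, hpl⟩ := splitCh_single ':' rest p hsp
        subst hpl
        rw [scan2_no p hnm (String.ofList tok) values []]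
        rcases hsp2 : splitU p with _ | ⟨h, r2⟩
        · exact absurd hsp2 (splitU_ne_nil p)
        · simp [splitCh, hsp, hsp2]
      · have hm := mem_of_splitCh_two ':' rest hsp
        rw [scan2_colon rest hm (String.ofList tok) values []]
        simp [splitCh, hsp]
    · simp only [pvScanB, if_neg hc]
      rw [ih values (tok ++ [c])]
      rcases hsp : splitCh ':' rest with _ | ⟨p, _ | ⟨q, _ | _⟩⟩
      · exact absurd hsp (splitCh_ne_nil ':' rest)
      · simp [splitCh, hsp, hc]
      · simp [splitCh, hsp, hc]
      · simp [splitCh, hsp, hc]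

-- the two loop bodies agree on every header
theorem step_eq : pvStepA = (fun d header =>
    match pvScanB header.toList none [] [] with
    | some (k, vals) => d.insert k vals
    | none => d) := by
  funext d header
  unfold pvStepA
  rw [scan1, splitOn_single]
  rcases hsp : splitCh ':' header.toList with _ | ⟨p, _ | ⟨q, _ | _⟩⟩
  · rfl
  · rfl
  · simp only [List.map_cons, List.map_nil, List.nil_append]
    have hv := value_eq (String.ofList q)
    rw [hv]
    have htl : (String.ofList q).toList = q := by simp
    rw [htl, replace_single ';' ',' q, splitOn_single, ← splitU_eq, List.map_map]
    rfl
  · rfl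

-- ===== VERDICT (by name: the statement is the Claim_ definition above) =====
theorem requestHeaders_spec : Claim_equal_requestHeaders := by
  intro headers _
  unfold Spec_requestHeaders requestHeaders requestHeaders_alt
  rw [step_eq]
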